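-- pv_equiv track=rewrite | github.com/samreensaif/Hackathon-Five--The-CRM-Digital-FTE-Factory- | 1-Incubation-Phase/src/agent/prototype.py | _extract_relevant_excerpt
-- ===== SOURCE A (Python) =====
-- def _extract_relevant_excerpt(section_body: str, max_chars: int) -> str:
--     """Extract a clean excerpt from a doc section, respecting structure."""
--     lines = section_body.split("\n")
--     relevant_lines = []
--     char_count = 0
--
--     for line in lines:
--         stripped = line.strip()
--         if not stripped:
--             continue
--         # Skip table header separators
--         if stripped.startswith('|') and set(stripped.replace('|', '').strip()) <= {'-', ' '}:
--             continue
--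
--         relevant_lines.append(stripped)
--         char_count += len(stripped)
--         if char_count > max_chars:
--             break
--
--     return "\n".join(relevant_lines)
-- ===== SOURCE B (Python) =====
-- def _extract_relevant_excerpt(section_body: str, max_chars: int) -> str:
--     """Filter pass, prefix-sum table, then BINARY SEARCH for the cutoff line."""
--     cleaned = []
--     for raw in section_body.split("\n"):
--         s = raw.strip()
--         if s and not (s.startswith('|') and set(s.replace('|', '').strip()) <= {'-', ' '}):
--             cleaned.append(s)
--     sums, total = [0], 0
--     for s in cleaned:
--         total += len(s)
--         sums.append(total)
--     # sums is strictly increasing, so binary-search the first line whose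
--     # cumulative total exceeds the budget; keep it as well.
--     n = len(cleaned)
--     lo, hi = 0, n
--     while lo < hi:
--         mid = (lo + hi) // 2
--         if sums[mid + 1] > max_chars:
--             hi = mid
--         else:
--             lo = mid + 1
--     return "\n".join(cleaned[:min(lo + 1, n)])
-- ===== Notes on version B (the rewrite author's own statement) =====
-- stated objective: alternative
-- what changed: A's single interleaved loop (skip blanks/separators, append, break once the budget is exceeded) is replaced by a filter pass building the cleaned lines, a prefix-sum table of their lengths, and a BINARY SEARCH over that strictly increasing table for the first line whose cumulative total exceeds max_chars; the kept prefix (including that line) is joined.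
import Mathlib
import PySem

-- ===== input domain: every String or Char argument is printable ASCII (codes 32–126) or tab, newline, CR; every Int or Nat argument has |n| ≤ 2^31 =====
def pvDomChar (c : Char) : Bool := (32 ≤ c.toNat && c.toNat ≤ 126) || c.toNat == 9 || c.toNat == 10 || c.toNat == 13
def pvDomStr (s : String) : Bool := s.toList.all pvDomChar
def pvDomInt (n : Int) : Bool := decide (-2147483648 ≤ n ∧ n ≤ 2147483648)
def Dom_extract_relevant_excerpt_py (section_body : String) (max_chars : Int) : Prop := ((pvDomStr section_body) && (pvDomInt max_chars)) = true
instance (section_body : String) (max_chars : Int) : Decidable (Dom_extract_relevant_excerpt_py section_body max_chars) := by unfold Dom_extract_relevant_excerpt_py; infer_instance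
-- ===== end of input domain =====

-- B replaces A's single interleaved loop (skip / append / budget-break) by a filter pass, a
-- prefix-sum table and a binary search for the cutoff line; same return value (objective: alternative).

-- ===== PORT A =====
-- A's for-loop with break: structural recursion over the lines, carrying the output list and char_count.
def pvLoopA (mc : Int) : List String → List String → Int → List String
  | [], acc, _ => acc
  | line :: rest, acc, cnt =>
    let stripped := PySem.Str.strip line
    if PySem.Str.len stripped == 0 then pvLoopA mc rest acc cnt
    else if PySem.Str.startswith stripped "|"
            && PySem.Set.issubset
                 (PySem.Set.ofList (PySem.Str.strip (PySem.Str.replace stripped "|" "")).toList)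
                 (PySem.Set.ofList ['-', ' ']) then
      pvLoopA mc rest acc cnt
    else
      let acc' := acc ++ [stripped]
      let cnt' := cnt + PySem.Str.len stripped
      if mc < cnt' then acc' else pvLoopA mc rest acc' cnt'

def extract_relevant_excerpt_py (section_body : String) (max_chars : Int) : String :=
  PySem.Str.join "\n" (pvLoopA max_chars ((PySem.Str.split? section_body "\n").getD []) [] 0)

-- ===== PORT B =====
-- Source B's filter condition: non-blank and not a table-separator row
def pvKeepB (s : String) : Bool :=
  !(PySem.Str.len s == 0)
  && !(PySem.Str.startswith s "|"
       && PySem.Set.issubset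
            (PySem.Set.ofList (PySem.Str.strip (PySem.Str.replace s "|" "")).toList)
            (PySem.Set.ofList ['-', ' ']))

-- Source B's while-loop binary search (sums[mid+1] always in range when hi ≤ number of lines)
def pvBS (sums : List Int) (mc : Int) (lo hi : Nat) : Nat :=
  if h : lo < hi then
    let mid := (lo + hi) / 2
    if mc < sums.getD (mid + 1) 0 then pvBS sums mc lo mid else pvBS sums mc (mid + 1) hi
  else lo
termination_by hi - lo
decreasing_by
  · have : (lo + hi) / 2 < hi := by omega
    omega
  · have : lo ≤ (lo + hi) / 2 := by omega
    omega

def extract_relevant_excerpt_py_alt (section_body : String) (max_chars : Int) : String :=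
  let cleaned := ((PySem.Str.split? section_body "\n").getD []).foldl
      (fun acc raw => let s := PySem.Str.strip raw; if pvKeepB s then acc ++ [s] else acc) []
  let sums := (cleaned.foldl
      (fun (p : List Int × Int) s => (p.1 ++ [p.2 + PySem.Str.len s], p.2 + PySem.Str.len s))
      ([0], 0)).1
  let n := cleaned.length
  let lo := pvBS sums max_chars 0 n
  PySem.Str.join "\n" (cleaned.take (min (lo + 1) n))

-- ===== PRECONDITION & SPEC =====
def Spec_extract_relevant_excerpt_py (section_body : String) (max_chars : Int) (out : String) : Prop := out = extract_relevant_excerpt_py_alt section_body max_chars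
instance (section_body : String) (max_chars : Int) (out : String) : Decidable (Spec_extract_relevant_excerpt_py section_body max_chars out) := by unfold Spec_extract_relevant_excerpt_py; infer_instance

-- ===== CLAIM (what is proved, stated in full; the proofs are below) =====
def Claim_equal_extract_relevant_excerpt_py : Prop := ∀ (section_body : String) (max_chars : Int), Dom_extract_relevant_excerpt_py section_body max_chars → Spec_extract_relevant_excerpt_py section_body max_chars (extract_relevant_excerpt_py section_body max_chars)

-- ===== LEMMAS AND PROOFS =====

-- reference: the kept prefix of the filtered lines, given the chars already counted
def pvCut (mc : Int) : List String → Int → List String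
  | [], _ => []
  | s :: t, cnt => s :: (if mc < cnt + PySem.Str.len s then [] else pvCut mc t (cnt + PySem.Str.len s))

-- how many lines pvCut keeps
def pvCount (mc : Int) : List String → Int → Nat
  | [], _ => 0
  | s :: t, cnt => if mc < cnt + PySem.Str.len s then 1 else 1 + pvCount mc t (cnt + PySem.Str.len s)

-- total length of a list of lines
def pvSumLen : List String → Int
  | [] => 0
  | s :: t => PySem.Str.len s + pvSumLen t

-- the running totals produced by Source B's second loop, from offset c
def pvSums : List String → Int → List Int
  | [], _ => []
  | s :: t, c => (c + PySem.Str.len s) :: pvSums t (c + PySem.Str.len s)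

theorem pvLen_nonneg (s : String) : 0 ≤ PySem.Str.len s := by
  simp [PySem.Str.len_eq]

theorem pvLoopA_eq (mc : Int) (lines : List String) (acc : List String) (cnt : Int) :
    pvLoopA mc lines acc cnt = acc ++ pvCut mc ((lines.map PySem.Str.strip).filter pvKeepB) cnt := by
  induction lines generalizing acc cnt with
  | nil => simp [pvLoopA, pvCut]
  | cons line rest ih =>
    simp only [pvLoopA, List.map_cons, List.filter_cons]
    by_cases h0 : (PySem.Str.len (PySem.Str.strip line) == 0) = true
    · have hk : pvKeepB (PySem.Str.strip line) = false := by
        simp only [pvKeepB, h0, Bool.not_true, Bool.false_and]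
      rw [if_pos h0, hk, if_neg Bool.false_ne_true]
      exact ih acc cnt
    · rw [if_neg h0]
      by_cases hsep : (PySem.Str.startswith (PySem.Str.strip line) "|"
          && PySem.Set.issubset
               (PySem.Set.ofList (PySem.Str.strip (PySem.Str.replace (PySem.Str.strip line) "|" "")).toList)
               (PySem.Set.ofList ['-', ' '])) = true
      · have hk : pvKeepB (PySem.Str.strip line) = false := by
          simp only [pvKeepB, hsep, Bool.not_true, Bool.and_false]
        rw [if_pos hsep, hk, if_neg Bool.false_ne_true]
        exact ih acc cnt
      · have hk : pvKeepB (PySem.Str.strip line) = true := by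
          have hA : (PySem.Str.len (PySem.Str.strip line) == 0) = false := Bool.eq_false_iff.mpr h0
          have hB := Bool.eq_false_iff.mpr hsep
          simp only [pvKeepB, hA, hB, Bool.not_false, Bool.and_self]
        rw [if_neg hsep, hk, if_pos rfl]
        simp only [pvCut]
        by_cases hbr : mc < cnt + PySem.Str.len (PySem.Str.strip line)
        · rw [if_pos hbr, if_pos hbr]
        · rw [if_neg hbr, if_neg hbr, ih]
          simp

theorem pvClean_fold (ls : List String) (acc : List String) :
    ls.foldl (fun acc raw => let s := PySem.Str.strip raw; if pvKeepB s then acc ++ [s] else acc) acc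
      = acc ++ (ls.map PySem.Str.strip).filter pvKeepB := by
  induction ls generalizing acc with
  | nil => simp
  | cons l t ih =>
    simp only [List.foldl_cons, List.map_cons, List.filter_cons]
    by_cases h : pvKeepB (PySem.Str.strip l) = true
    · rw [if_pos h, ih, if_pos h]; simp
    · rw [if_neg h, ih, if_neg h]

theorem pvSums_fold (fs : List String) (acc : List Int) (c : Int) :
    (fs.foldl (fun (p : List Int × Int) s => (p.1 ++ [p.2 + PySem.Str.len s], p.2 + PySem.Str.len s)) (acc, c)).1
      = acc ++ pvSums fs c := by
  induction fs generalizing acc c with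
  | nil => simp [pvSums]
  | cons s t ih =>
    simp only [List.foldl_cons, pvSums]
    rw [ih]
    simp

theorem pvSums_getD (fs : List String) (c : Int) (t : Nat) (ht : t < fs.length) :
    (pvSums fs c).getD t 0 = c + pvSumLen (fs.take (t + 1)) := by
  induction fs generalizing c t with
  | nil => simp at ht
  | cons s r ih =>
    cases t with
    | zero => simp [pvSums, pvSumLen]
    | succ t' =>
      simp only [pvSums, List.getD_cons_succ, List.take_succ_cons, pvSumLen]
      rw [ih _ t' (by simpa using ht)]
      ring

theorem pvSumLen_nonneg (fs : List String) : 0 ≤ pvSumLen fs := by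
  induction fs with
  | nil => simp [pvSumLen]
  | cons s t ih => have := pvLen_nonneg s; simp [pvSumLen]; omega

theorem pvSumLen_take_mono (fs : List String) (a b : Nat) (h : a ≤ b) :
    pvSumLen (fs.take a) ≤ pvSumLen (fs.take b) := by
  induction fs generalizing a b with
  | nil => simp
  | cons s t ih =>
    cases a with
    | zero =>
      have h1 := pvSumLen_nonneg ((s :: t).take b)
      simpa [pvSumLen] using h1
    | succ a' =>
      cases b with
      | zero => omega
      | succ b' =>
        simp only [List.take_succ_cons, pvSumLen]
        have := ih a' b' (by omega)
        omega

theorem pvBS_correct (fs : List String) (mc : Int) (lo hi : Nat)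
    (hlh : lo ≤ hi) (hhn : hi ≤ fs.length)
    (hlo : ∀ i < lo, pvSumLen (fs.take (i + 1)) ≤ mc)
    (hhi : ∀ i, hi ≤ i → i < fs.length → mc < pvSumLen (fs.take (i + 1))) :
    lo ≤ pvBS (0 :: pvSums fs 0) mc lo hi ∧ pvBS (0 :: pvSums fs 0) mc lo hi ≤ hi ∧
    (∀ i < pvBS (0 :: pvSums fs 0) mc lo hi, pvSumLen (fs.take (i + 1)) ≤ mc) ∧
    (pvBS (0 :: pvSums fs 0) mc lo hi < fs.length →
      mc < pvSumLen (fs.take (pvBS (0 :: pvSums fs 0) mc lo hi + 1))) := by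
  generalize hk : hi - lo = k
  induction k using Nat.strong_induction_on generalizing lo hi with
  | _ k ih =>
    rw [pvBS]
    by_cases h : lo < hi
    · rw [dif_pos h]
      have hmidlt : (lo + hi) / 2 < hi := by omega
      have hmidge : lo ≤ (lo + hi) / 2 := by omega
      have hmidn : (lo + hi) / 2 < fs.length := by omega
      have hget : (0 :: pvSums fs 0).getD ((lo + hi) / 2 + 1) 0
          = pvSumLen (fs.take ((lo + hi) / 2 + 1)) := by
        rw [List.getD_cons_succ, pvSums_getD fs 0 _ hmidn, zero_add]
      by_cases hp : mc < (0 :: pvSums fs 0).getD ((lo + hi) / 2 + 1) 0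
      · rw [if_pos hp]
        have hhi' : ∀ i, (lo + hi) / 2 ≤ i → i < fs.length → mc < pvSumLen (fs.take (i + 1)) := by
          intro i h1 h2
          calc mc < pvSumLen (fs.take ((lo + hi) / 2 + 1)) := by rw [← hget]; exact hp
            _ ≤ pvSumLen (fs.take (i + 1)) := pvSumLen_take_mono fs _ _ (by omega)
        have h2 := ih ((lo + hi) / 2 - lo) (by omega) lo ((lo + hi) / 2) hmidge (by omega) hlo hhi' rfl
        exact ⟨h2.1, by omega, h2.2.2.1, h2.2.2.2⟩
      · rw [if_neg hp]
        have hnp : pvSumLen (fs.take ((lo + hi) / 2 + 1)) ≤ mc := by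
          rw [← hget]; omega
        have hlo' : ∀ i < (lo + hi) / 2 + 1, pvSumLen (fs.take (i + 1)) ≤ mc := by
          intro i h1
          calc pvSumLen (fs.take (i + 1)) ≤ pvSumLen (fs.take ((lo + hi) / 2 + 1)) :=
                pvSumLen_take_mono fs _ _ (by omega)
            _ ≤ mc := hnp
        have h2 := ih (hi - ((lo + hi) / 2 + 1)) (by omega) ((lo + hi) / 2 + 1) hi (by omega) hhn hlo' hhi rfl
        exact ⟨by omega, h2.2.1, h2.2.2.1, h2.2.2.2⟩
    · rw [dif_neg h]
      have hle : lo = hi := by omega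
      exact ⟨le_rfl, by omega, hlo, fun hln => hhi lo (by omega) hln⟩

theorem pvCut_eq_take (mc : Int) (fs : List String) (c : Int) :
    pvCut mc fs c = fs.take (pvCount mc fs c) := by
  induction fs generalizing c with
  | nil => simp [pvCut, pvCount]
  | cons s t ih =>
    simp only [pvCut, pvCount]
    by_cases h : mc < c + PySem.Str.len s
    · rw [if_pos h, if_pos h]; simp
    · rw [if_neg h, if_neg h, ih, Nat.one_add, List.take_succ_cons]

theorem pvCount_char (mc : Int) (fs : List String) (c : Int) (r : Nat) (hr : r ≤ fs.length)
    (hlt : ∀ i < r, c + pvSumLen (fs.take (i + 1)) ≤ mc)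
    (hge : r < fs.length → mc < c + pvSumLen (fs.take (r + 1))) :
    pvCount mc fs c = min (r + 1) fs.length := by
  induction fs generalizing c r with
  | nil => simp [pvCount]
  | cons s t ih =>
    simp only [pvCount]
    by_cases h : mc < c + PySem.Str.len s
    · rw [if_pos h]
      have hr0 : r = 0 := by
        by_contra hne
        have := hlt 0 (by omega)
        simp [pvSumLen, PySem.Str.len_eq] at this h
        omega
      subst hr0
      simp
    · rw [if_neg h]
      have hr1 : 1 ≤ r := by
        by_contra hne
        have hr0 : r = 0 := by omega
        subst hr0
        have := hge (by simp)
        simp [pvSumLen, PySem.Str.len_eq] at this h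
        omega
      have hlt' : ∀ i < r - 1, (c + PySem.Str.len s) + pvSumLen (t.take (i + 1)) ≤ mc := by
        intro i h1
        have := hlt (i + 1) (by omega)
        simp only [List.take_succ_cons, pvSumLen] at this
        omega
      have hge' : r - 1 < t.length → mc < (c + PySem.Str.len s) + pvSumLen (t.take (r - 1 + 1)) := by
        intro h1
        have := hge (by simp; omega)
        have he : r - 1 + 1 = r := by omega
        rw [he]
        simp only [List.take_succ_cons, pvSumLen] at this
        omega
      rw [ih (c + PySem.Str.len s) (r - 1) (by simp at hr; omega) hlt' hge']
      simp only [List.length_cons]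
      omega

theorem pvAlt_eq (sb : String) (mc : Int) :
    extract_relevant_excerpt_py_alt sb mc
      = PySem.Str.join "\n" (pvCut mc ((((PySem.Str.split? sb "\n").getD []).map PySem.Str.strip).filter pvKeepB) 0) := by
  simp only [extract_relevant_excerpt_py_alt]
  rw [pvClean_fold, List.nil_append, pvSums_fold]
  simp only [List.cons_append, List.nil_append]
  generalize (((PySem.Str.split? sb "\n").getD []).map PySem.Str.strip).filter pvKeepB = fs
  have hbs := pvBS_correct fs mc 0 fs.length (by omega) le_rfl
    (by intro i hi; omega) (by intro i h1 h2; omega)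
  set r := pvBS (0 :: pvSums fs 0) mc 0 fs.length with hrdef
  have hcut : pvCount mc fs 0 = min (r + 1) fs.length := by
    refine pvCount_char mc fs 0 r hbs.2.1 ?_ ?_
    · intro i hi
      have := hbs.2.2.1 i hi
      omega
    · intro h1
      have := hbs.2.2.2 h1
      omega
  rw [pvCut_eq_take, hcut]

-- ===== VERDICT (by name: the statement is the Claim_ definition above) =====
theorem extract_relevant_excerpt_py_spec : Claim_equal_extract_relevant_excerpt_py := by
  intro sb mc _
  unfold Spec_extract_relevant_excerpt_py extract_relevant_excerpt_py
  rw [pvLoopA_eq, pvAlt_eq, List.nil_append]
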